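-- pv_equiv track=rewrite | github.com/goral202/Caption_Gen | load_dataset.py | create_word_set
-- ===== SOURCE A (Python) =====
-- def create_word_set(dataset):
--   word_set = set()
--   max_length = 0
--   number_of_captions = 0
--   for key in dataset.keys():
--     for caption in dataset[key]['captions']:
--       number_of_captions +=1
--       words = caption.split()
--       word_set.update(words)
--       if len(words)>max_length:
--         max_length = len(words)
--   return word_set, max_length, number_of_captions
-- ===== SOURCE B (Python) =====
-- def create_word_set(dataset):
--     word_set = set()
--     max_length = 0
--     number_of_captions = 0
--     for entry in dataset.values():
--         for caption in entry['captions']: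
--             number_of_captions += 1
--             words_in_caption = 0
--             buf = []
--             for ch in caption:
--                 if ch.isspace():
--                     if buf:
--                         word_set.add(''.join(buf))
--                         words_in_caption += 1
--                         buf = []
--                 else:
--                     buf.append(ch)
--             if buf:
--                 word_set.add(''.join(buf))
--                 words_in_caption += 1
--             if words_in_caption > max_length:
--                 max_length = words_in_caption
--     return word_set, max_length, number_of_captions
-- ===== Notes on version B (the rewrite author's own statement) =====
-- stated objective: alternative
-- what changed: Replaces str.split plus set.update with a hand-written character-level streaming tokenizer: each caption's characters are scanned once with a word buffer, words are added to the set and counted on the fly, so per-caption word lists are never materialized; it also iterates dataset.values() directly instead of keys plus re-lookup.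
import Mathlib
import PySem

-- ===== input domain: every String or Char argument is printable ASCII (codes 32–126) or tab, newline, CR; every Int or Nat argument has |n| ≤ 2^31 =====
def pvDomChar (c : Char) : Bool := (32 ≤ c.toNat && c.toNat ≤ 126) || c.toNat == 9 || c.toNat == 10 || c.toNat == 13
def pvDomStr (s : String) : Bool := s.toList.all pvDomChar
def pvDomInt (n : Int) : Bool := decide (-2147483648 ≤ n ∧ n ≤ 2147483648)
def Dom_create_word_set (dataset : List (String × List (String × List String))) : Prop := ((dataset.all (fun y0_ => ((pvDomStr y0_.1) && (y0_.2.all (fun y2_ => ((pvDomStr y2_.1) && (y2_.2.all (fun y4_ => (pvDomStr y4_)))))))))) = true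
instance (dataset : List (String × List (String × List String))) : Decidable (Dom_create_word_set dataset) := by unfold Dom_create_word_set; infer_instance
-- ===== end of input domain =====

-- B replaces A's str.split-based loop by a hand-written character-level streaming
-- tokenizer (words are emitted into the set and counted on the fly, no per-caption
-- word lists) and iterates dict values directly instead of keys plus re-lookup.

-- ===== PORT A =====
def create_word_set (dataset : List (String × List (String × List String))) : List String × Int × Int :=
  let d := PySem.Dict.ofList dataset
  (PySem.Dict.keys d).foldl
    (fun st key =>
      ((PySem.Dict.ofList (PySem.Dict.getD d key [])).getD "captions" []).foldl
        (fun st caption =>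
          let words := PySem.Str.split₀ caption
          (PySem.Set.update st.1 words,
           if (words.length : Int) > st.2.1 then (words.length : Int) else st.2.1,
           st.2.2 + 1))
        st)
    ((PySem.Set.empty, 0, 0) : PySem.Set String × Int × Int)

-- ===== PORT B =====
-- Source B's inner character loop (buf kept reversed; String.ofList buf.reverse = ''.join(buf)),
-- including the post-loop flush of a non-empty buffer; returns (word_set, words_in_caption).
def pvScanCaption (cs : List Char) (buf : List Char) (ws : PySem.Set String) (cnt : Int) : PySem.Set String × Int :=
  match cs with
  | [] =>
      if buf.isEmpty then (ws, cnt)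
      else (PySem.Set.add ws (String.ofList buf.reverse), cnt + 1)
  | c :: rest =>
      if PySem.Chars.isspace c then
        if buf.isEmpty then pvScanCaption rest [] ws cnt
        else pvScanCaption rest [] (PySem.Set.add ws (String.ofList buf.reverse)) (cnt + 1)
      else pvScanCaption rest (c :: buf) ws cnt

def create_word_set_alt (dataset : List (String × List (String × List String))) : List String × Int × Int :=
  let d := PySem.Dict.ofList dataset
  (PySem.Dict.values d).foldl
    (fun st entry =>
      ((PySem.Dict.ofList entry).getD "captions" []).foldl
        (fun st caption =>
          let r := pvScanCaption caption.toList [] st.1 0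
          (r.1, if r.2 > st.2.1 then r.2 else st.2.1, st.2.2 + 1))
        st)
    ((PySem.Set.empty, 0, 0) : PySem.Set String × Int × Int)

-- ===== PRECONDITION & SPEC =====
-- Pre_ excludes exactly the inputs where Python A raises KeyError: some inner dict
-- (after outer-dict key deduplication) has no "captions" key.
def Pre_create_word_set (dataset : List (String × List (String × List String))) : Prop :=
  ∀ kv ∈ (PySem.Dict.ofList dataset).items, (PySem.Dict.ofList kv.2).contains "captions" = true
instance (dataset : List (String × List (String × List String))) : Decidable (Pre_create_word_set dataset) := by unfold Pre_create_word_set; infer_instance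
def pvWitness_create_word_set : (List (String × List (String × List String))) :=
  [("a", [("captions", ["hi there", "hi"])]), ("b", [("captions", [])])]
def Spec_create_word_set (dataset : List (String × List (String × List String))) (out : List String × Int × Int) : Prop := out = create_word_set_alt dataset
instance (dataset : List (String × List (String × List String))) (out : List String × Int × Int) : Decidable (Spec_create_word_set dataset out) := by unfold Spec_create_word_set; infer_instance

-- ===== CLAIM (what is proved, stated in full; the proofs are below) =====
def Claim_equal_create_word_set : Prop := ∀ (dataset : List (String × List (String × List String))), Dom_create_word_set dataset → Pre_create_word_set dataset → Spec_create_word_set dataset (create_word_set dataset)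

-- ===== LEMMAS AND PROOFS =====

theorem pv_go_acc (cs : List Char) (cur : List Char) (acc : List (List Char)) :
    PySem.Chars.split₀.go cs cur acc = acc.reverse ++ PySem.Chars.split₀.go cs cur [] := by
  induction cs generalizing cur acc with
  | nil =>
      simp only [PySem.Chars.split₀.go]
      split_ifs <;> simp
  | cons c rest ih =>
      simp only [PySem.Chars.split₀.go]
      split_ifs with h1 h2
      · rw [ih _ acc]
      · rw [ih _ (cur.reverse :: acc), ih _ [cur.reverse]]
        simp
      · exact ih _ acc

theorem pv_scan_eq (cs : List Char) (cur : List Char) (ws : PySem.Set String) (cnt : Int) :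
    pvScanCaption cs cur ws cnt =
      (PySem.Set.update ws ((PySem.Chars.split₀.go cs cur []).map String.ofList),
       cnt + ((PySem.Chars.split₀.go cs cur []).length : Int)) := by
  induction cs generalizing cur ws cnt with
  | nil =>
      simp only [pvScanCaption, PySem.Chars.split₀.go]
      split_ifs <;> simp [PySem.Set.update]
  | cons c rest ih =>
      simp only [pvScanCaption, PySem.Chars.split₀.go]
      split_ifs with h1 h2
      · exact ih _ _ _
      · rw [ih _ _ _, pv_go_acc rest [] [cur.reverse]]
        simp [PySem.Set.update]
        omega
      · exact ih _ _ _

theorem pv_inner_body (st : PySem.Set String × Int × Int) (caption : String) :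
    (let r := pvScanCaption caption.toList [] st.1 0
     ((r.1, if r.2 > st.2.1 then r.2 else st.2.1, st.2.2 + 1) : PySem.Set String × Int × Int)) =
    (let words := PySem.Str.split₀ caption
     (PySem.Set.update st.1 words,
      if (words.length : Int) > st.2.1 then (words.length : Int) else st.2.1,
      st.2.2 + 1)) := by
  simp only [pv_scan_eq, PySem.Str.split₀, PySem.Chars.split₀, List.length_map, zero_add]

theorem pv_keys_getD_map {ν : Type} (d : PySem.Dict String ν) (h : d.keys.Nodup) (v0 : ν) :
    d.keys.map (fun k => d.getD k v0) = d.values := by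
  simp only [PySem.Dict.keys, PySem.Dict.values, List.map_map]
  apply List.map_congr_left
  intro p hp
  exact PySem.Dict.getD_of_mem_items d (k := p.1) (v := p.2) (by simpa using hp) h v0

-- ===== VERDICT (by name: the statement is the Claim_ definition above) =====
theorem create_word_set_spec : Claim_equal_create_word_set := by
  intro dataset _ _
  unfold Spec_create_word_set create_word_set create_word_set_alt
  have hkeys :
      (PySem.Dict.keys (PySem.Dict.ofList dataset)).foldl
        (fun (st : PySem.Set String × Int × Int) key =>
          ((PySem.Dict.ofList (PySem.Dict.getD (PySem.Dict.ofList dataset) key [])).getD "captions" []).foldl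
            (fun st caption =>
              let words := PySem.Str.split₀ caption
              (PySem.Set.update st.1 words,
               if (words.length : Int) > st.2.1 then (words.length : Int) else st.2.1,
               st.2.2 + 1)) st)
        (PySem.Set.empty, 0, 0)
      = (PySem.Dict.values (PySem.Dict.ofList dataset)).foldl
        (fun (st : PySem.Set String × Int × Int) entry =>
          ((PySem.Dict.ofList entry).getD "captions" []).foldl
            (fun st caption =>
              let words := PySem.Str.split₀ caption
              (PySem.Set.update st.1 words,
               if (words.length : Int) > st.2.1 then (words.length : Int) else st.2.1,
               st.2.2 + 1)) st)
        (PySem.Set.empty, 0, 0) := by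
    rw [← pv_keys_getD_map (PySem.Dict.ofList dataset) (PySem.Dict.nodup_keys_ofList dataset) [],
        List.foldl_map]
  rw [hkeys]
  congr 1
  funext st entry
  congr 1
  funext st caption
  exact (pv_inner_body st caption).symm
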